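-- pv_equiv track=rewrite | github.com/basavyr/ics-event-maker | src/day_generator.py | generate_month_work_days
-- ===== SOURCE A (Python) =====
-- def generate_month_work_days(month_first_work_day, month_days):
--     """
--     generate the list of working days based on the first day configured by the user
--     """
--     work_days = []
--     id = 1
--     for count in range(month_first_work_day - 1, len(month_days)):
--         if(id <= 5):
--             work_days.append(month_days[count])
--             id += 1
--         elif(id == 6):
--             # skip a free day
--             id += 1
--         elif(id == 7):
--             # skip a free day
--             # reset the index
--             id = 1
--
--     return work_days
-- ===== SOURCE B (Python) =====
-- def generate_month_work_days(month_first_work_day, month_days):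
--     """
--     generate the list of working days based on the first day configured by the user
--     """
--     n = len(month_days)
--     work_days = []
--     w = month_first_work_day - 1
--     while w < n:
--         for k in range(5):
--             idx = w + k
--             if idx < n:
--                 work_days.append(month_days[idx])
--         w += 7
--     return work_days
-- ===== Notes on version B (the rewrite author's own statement) =====
-- stated objective: alternative
-- what changed: Replaces A's single linear scan with a 1..7 cycling day-counter state machine by a two-level traversal: an outer loop over week starts (start, start+7, ...) and an inner loop over the 5 work-day offsets of each week, appending month_days[w+k] when the index is below the month length.
import Mathlib
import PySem

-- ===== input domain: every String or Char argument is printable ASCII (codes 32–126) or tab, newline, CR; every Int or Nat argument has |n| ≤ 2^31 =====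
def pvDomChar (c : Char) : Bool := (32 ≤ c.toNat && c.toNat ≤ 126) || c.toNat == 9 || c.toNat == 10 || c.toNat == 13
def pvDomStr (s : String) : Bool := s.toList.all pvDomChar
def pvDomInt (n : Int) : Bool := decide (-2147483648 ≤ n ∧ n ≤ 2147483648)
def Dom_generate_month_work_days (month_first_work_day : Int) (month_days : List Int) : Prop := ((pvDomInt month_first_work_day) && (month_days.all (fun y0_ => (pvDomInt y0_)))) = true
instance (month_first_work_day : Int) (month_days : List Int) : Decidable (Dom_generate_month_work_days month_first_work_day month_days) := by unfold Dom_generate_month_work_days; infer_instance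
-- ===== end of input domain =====

-- B replaces A's 1..7 cycling day-counter state machine by an explicit weeks-by-days
-- two-level traversal (outer loop over week starts, inner loop over the 5 work-day
-- offsets); alternative decomposition, same O(n) cost.


-- ===== PORT A =====
-- literal port of A: fold over range(month_first_work_day-1, len(month_days)) carrying
-- (work_days, id); month_days[count] is pyGet? (none = IndexError, excluded by Pre_; .getD 0 never used inside Pre_)
def generate_month_work_days (month_first_work_day : Int) (month_days : List Int) : List Int :=
  ((PySem.List.pyRange (month_first_work_day - 1) (month_days.length : Int) 1).foldl
    (fun (st : List Int × Int) count =>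
      if st.2 ≤ 5 then (st.1 ++ [(PySem.List.pyGet? month_days count).getD 0], st.2 + 1)
      else if st.2 = 6 then (st.1, st.2 + 1)
      else if st.2 = 7 then (st.1, 1)
      else st)
    ([], 1)).1

-- ===== PORT B =====
-- B's while loop over week starts w, inner for k in range(5): append month_days[w+k] if w+k < n
def pv_weeks (month_days : List Int) (n w : Int) : List Int :=
  if _h : w < n then
    ((PySem.List.pyRange 0 5 1).foldl
      (fun acc k => if w + k < n then acc ++ [(PySem.List.pyGet? month_days (w + k)).getD 0] else acc) [])
    ++ pv_weeks month_days n (w + 7)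
  else []
termination_by (n - w).toNat
decreasing_by omega

def generate_month_work_days_alt (month_first_work_day : Int) (month_days : List Int) : List Int :=
  pv_weeks month_days (month_days.length : Int) (month_first_work_day - 1)

-- ===== PRECONDITION & SPEC =====
-- Pre_ excludes exactly the inputs where Python A raises IndexError (the first index
-- month_first_work_day - 1 below -len(month_days)); Python B raises there too.
def Pre_generate_month_work_days (month_first_work_day : Int) (month_days : List Int) : Prop :=
  -(month_days.length : Int) ≤ month_first_work_day - 1
instance (month_first_work_day : Int) (month_days : List Int) : Decidable (Pre_generate_month_work_days month_first_work_day month_days) := by unfold Pre_generate_month_work_days; infer_instance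
def pvWitness_generate_month_work_days : Int × List Int := (1, [5, 6, 7, 8, 9, 12, 13, 14, 15, 16])
def Spec_generate_month_work_days (month_first_work_day : Int) (month_days : List Int) (out : List Int) : Prop := out = generate_month_work_days_alt month_first_work_day month_days
instance (month_first_work_day : Int) (month_days : List Int) (out : List Int) : Decidable (Spec_generate_month_work_days month_first_work_day month_days out) := by unfold Spec_generate_month_work_days; infer_instance

-- ===== CLAIM (what is proved, stated in full; the proofs are below) =====
def Claim_equal_generate_month_work_days : Prop := ∀ (month_first_work_day : Int) (month_days : List Int), Dom_generate_month_work_days month_first_work_day month_days → Pre_generate_month_work_days month_first_work_day month_days → Spec_generate_month_work_days month_first_work_day month_days (generate_month_work_days month_first_work_day month_days)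

-- ===== LEMMAS AND PROOFS =====

-- day-by-day reformulation of A's fold (same state machine, recursion instead of fold)
def pv_fA (month_days : List Int) (n w id : Int) : List Int :=
  if h : w < n then
    if id ≤ 5 then (PySem.List.pyGet? month_days w).getD 0 :: pv_fA month_days n (w + 1) (id + 1)
    else if id = 6 then pv_fA month_days n (w + 1) (id + 1)
    else if id = 7 then pv_fA month_days n (w + 1) 1
    else pv_fA month_days n (w + 1) id
  else []
termination_by (n - w).toNat
decreasing_by all_goals omega

lemma pv_fA_stop (month_days : List Int) (n w id : Int) (h : ¬ w < n) :
    pv_fA month_days n w id = [] := by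
  rw [pv_fA]; simp [h]

lemma pv_foldA_eq (month_days : List Int) (n : Int) :
    ∀ (fuel : Nat) (w : Int), (n - w).toNat ≤ fuel → ∀ (acc : List Int) (id : Int),
    ((PySem.List.pyRange w n 1).foldl
      (fun (st : List Int × Int) count =>
        if st.2 ≤ 5 then (st.1 ++ [(PySem.List.pyGet? month_days count).getD 0], st.2 + 1)
        else if st.2 = 6 then (st.1, st.2 + 1)
        else if st.2 = 7 then (st.1, 1)
        else st)
      (acc, id)).1 = acc ++ pv_fA month_days n w id := by
  intro fuel
  induction fuel with
  | zero =>
      intro w hw acc id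
      have hnw : ¬ w < n := by omega
      rw [PySem.List.pyRange, pv_fA_stop _ _ _ _ hnw]
      simp [hnw]
  | succ m ih =>
      intro w hw acc id
      by_cases hlt : w < n
      · rw [PySem.List.pyRange_one_cons hlt]
        rw [pv_fA]
        simp only [List.foldl_cons, hlt, dif_pos]
        by_cases h5 : id ≤ 5
        · rw [ih (w + 1) (by omega)]
          simp [h5]
        · by_cases h6 : id = 6
          · rw [ih (w + 1) (by omega)]
            simp [h6]
          · by_cases h7 : id = 7
            · rw [ih (w + 1) (by omega)]
              simp [h7]
            · rw [ih (w + 1) (by omega)]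
              simp [h5, h6, h7]
      · rw [PySem.List.pyRange, pv_fA_stop _ _ _ _ hlt]
        simp [hlt]

lemma pv_range05 : PySem.List.pyRange 0 5 1 = [0, 1, 2, 3, 4] := by decide

lemma pv_weeks_stop (month_days : List Int) (n w : Int) (h : ¬ w < n) :
    pv_weeks month_days n w = [] := by
  rw [pv_weeks]; simp [h]

lemma pv_fA_take (month_days : List Int) (n w id : Int) (h : w < n) (h5 : id ≤ 5) :
    pv_fA month_days n w id
      = (PySem.List.pyGet? month_days w).getD 0 :: pv_fA month_days n (w + 1) (id + 1) := by
  rw [pv_fA]; simp [h, h5]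

lemma pv_fA_skip6 (month_days : List Int) (n w : Int) (h : w < n) :
    pv_fA month_days n w 6 = pv_fA month_days n (w + 1) 7 := by
  rw [pv_fA]; simp [h]

lemma pv_fA_skip7 (month_days : List Int) (n w : Int) (h : w < n) :
    pv_fA month_days n w 7 = pv_fA month_days n (w + 1) 1 := by
  rw [pv_fA]; simp [h]

lemma pv_fA_eq_weeks (month_days : List Int) (n : Int) :
    ∀ (fuel : Nat) (w : Int), (n - w).toNat ≤ fuel →
    pv_fA month_days n w 1 = pv_weeks month_days n w := by
  intro fuel
  induction fuel with
  | zero =>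
      intro w hw
      have hnw : ¬ w < n := by omega
      rw [pv_fA_stop _ _ _ _ hnw, pv_weeks_stop _ _ _ hnw]
  | succ m ih =>
      intro w hw
      by_cases h0 : w < n
      · rw [pv_weeks]
        rw [pv_fA_take _ _ _ _ h0 (by norm_num), show (1:Int) + 1 = 2 from by norm_num]
        by_cases h1 : w + 1 < n
        · rw [pv_fA_take _ _ _ _ h1 (by norm_num),
             show w + 1 + 1 = w + 2 from by ring, show (2:Int) + 1 = 3 from by norm_num]
          by_cases h2 : w + 2 < n
          · rw [pv_fA_take _ _ _ _ h2 (by norm_num),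
               show w + 2 + 1 = w + 3 from by ring, show (3:Int) + 1 = 4 from by norm_num]
            by_cases h3 : w + 3 < n
            · rw [pv_fA_take _ _ _ _ h3 (by norm_num),
                 show w + 3 + 1 = w + 4 from by ring, show (4:Int) + 1 = 5 from by norm_num]
              by_cases h4 : w + 4 < n
              · rw [pv_fA_take _ _ _ _ h4 (by norm_num),
                   show w + 4 + 1 = w + 5 from by ring, show (5:Int) + 1 = 6 from by norm_num]
                by_cases h5 : w + 5 < n
                · rw [pv_fA_skip6 _ _ _ h5, show w + 5 + 1 = w + 6 from by ring]
                  by_cases h6 : w + 6 < n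
                  · rw [pv_fA_skip7 _ _ _ h6, show w + 6 + 1 = w + 7 from by ring,
                       ih (w + 7) (by omega)]
                    simp [pv_range05, h0, h1, h2, h3, h4]
                  · rw [pv_fA_stop _ _ _ _ h6,
                       pv_weeks_stop month_days n (w + 7) (by omega)]
                    simp [pv_range05, h0, h1, h2, h3, h4]
                · rw [pv_fA_stop _ _ _ _ h5,
                     pv_weeks_stop month_days n (w + 7) (by omega)]
                  simp [pv_range05, h0, h1, h2, h3, h4]
              · rw [pv_fA_stop _ _ _ _ h4,
                   pv_weeks_stop month_days n (w + 7) (by omega)]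
                simp [pv_range05, h0, h1, h2, h3, h4]
            · rw [pv_fA_stop _ _ _ _ h3,
                 pv_weeks_stop month_days n (w + 7) (by omega)]
              simp [pv_range05, h0, h1, h2, h3, show ¬ w + 4 < n from by omega]
          · rw [pv_fA_stop _ _ _ _ h2,
               pv_weeks_stop month_days n (w + 7) (by omega)]
            simp [pv_range05, h0, h1, h2, show ¬ w + 3 < n from by omega,
                  show ¬ w + 4 < n from by omega]
        · rw [pv_fA_stop _ _ _ _ h1,
             pv_weeks_stop month_days n (w + 7) (by omega)]
          simp [pv_range05, h0, h1, show ¬ w + 2 < n from by omega,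
                show ¬ w + 3 < n from by omega, show ¬ w + 4 < n from by omega]
      · rw [pv_fA_stop _ _ _ _ h0, pv_weeks_stop _ _ _ h0]

-- ===== VERDICT (by name: the statement is the Claim_ definition above) =====
theorem generate_month_work_days_spec : Claim_equal_generate_month_work_days := by
  intro mfwd days _ _
  unfold Spec_generate_month_work_days generate_month_work_days generate_month_work_days_alt
  rw [pv_foldA_eq days (days.length : Int) ((days.length : Int) - (mfwd - 1)).toNat (mfwd - 1) (le_refl _) [] 1]
  rw [pv_fA_eq_weeks days (days.length : Int) ((days.length : Int) - (mfwd - 1)).toNat (mfwd - 1) (le_refl _)]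
  simp
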